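-- pv_equiv track=rewrite | github.com/michalhron/AI-futures | dashboard/data_utils.py | compatible_archetypes_for_vision
-- ===== SOURCE A (Python) =====
-- V2A_STANCED: dict[tuple[str, str], str] = {
--     ("Open Horizons, Unstable Ground", "Opening"): "Pioneer",
--     ("Open Horizons, Unstable Ground", "Mobilizing"): "Pioneer",
--     ("Open Horizons, Unstable Ground", "Normalizing"): "Pioneer",
--     ("Open Horizons, Unstable Ground", "Controlling"): "Guardian",
--     ("Empowered but Exposed", "Opening"): "Pioneer",
--     ("Empowered but Exposed", "Mobilizing"): "Builder",
--     ("Empowered but Exposed", "Normalizing"): "Guardian",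
--     ("Empowered but Exposed", "Controlling"): "Guardian",
--     ("Seamless but Concentrated", "Opening"): "Pioneer",
--     ("Seamless but Concentrated", "Mobilizing"): "Builder",
--     ("Seamless but Concentrated", "Normalizing"): "Pioneer",
--     ("Seamless but Concentrated", "Controlling"): "Guardian",
--     ("Transformed or Left Behind", "Opening"): "Pioneer",
--     ("Transformed or Left Behind", "Mobilizing"): "Builder",
--     ("Transformed or Left Behind", "Normalizing"): "Pioneer",
--     ("Transformed or Left Behind", "Controlling"): "Guardian",
--     ("Guided but Fragile", "Opening"): "Pioneer",
--     ("Guided but Fragile", "Mobilizing"): "Guardian",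
--     ("Guided but Fragile", "Normalizing"): "Guardian",
--     ("Guided but Fragile", "Controlling"): "Guardian",
-- }
--
-- def compatible_archetypes_for_vision(vision: str) -> set[str] | None:
--     """
--     Archetypes that appear in the vision×stance→archetype table for this vision (any stance).
--     Used to show ●/○ on the archetype multiselect when the user picks **vision first** without stances yet.
--     """
--     if vision == "All":
--         return None
--     out: set[str] = set()
--     for (v, _s), arch in V2A_STANCED.items():
--         if v == vision:
--             out.add(arch)
--     return out if out else None
-- ===== SOURCE B (Python) =====
-- # The stance table is a static module constant, so the vision -> archetypes
-- # relation is hand-maintained as a literal inverted map; the function is a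
-- # single dict lookup instead of a per-call scan of the whole table.
-- VISION2ARCHS: dict[str, frozenset[str]] = {
--     "Open Horizons, Unstable Ground": frozenset({"Pioneer", "Guardian"}),
--     "Empowered but Exposed": frozenset({"Pioneer", "Builder", "Guardian"}),
--     "Seamless but Concentrated": frozenset({"Pioneer", "Builder", "Guardian"}),
--     "Transformed or Left Behind": frozenset({"Pioneer", "Builder", "Guardian"}),
--     "Guided but Fragile": frozenset({"Pioneer", "Guardian"}),
-- }
--
-- def compatible_archetypes_for_vision(vision: str) -> set[str] | None:
--     if vision == "All":
--         return None
--     hits = VISION2ARCHS.get(vision)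
--     return set(hits) if hits else None
-- ===== Notes on version B (the rewrite author's own statement) =====
-- stated objective: idiomatic
-- what changed: A's per-call filtering scan over the 20-row stance table is replaced by a literal inverted map vision -> archetype set consulted with a single dict lookup.
import Mathlib
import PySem

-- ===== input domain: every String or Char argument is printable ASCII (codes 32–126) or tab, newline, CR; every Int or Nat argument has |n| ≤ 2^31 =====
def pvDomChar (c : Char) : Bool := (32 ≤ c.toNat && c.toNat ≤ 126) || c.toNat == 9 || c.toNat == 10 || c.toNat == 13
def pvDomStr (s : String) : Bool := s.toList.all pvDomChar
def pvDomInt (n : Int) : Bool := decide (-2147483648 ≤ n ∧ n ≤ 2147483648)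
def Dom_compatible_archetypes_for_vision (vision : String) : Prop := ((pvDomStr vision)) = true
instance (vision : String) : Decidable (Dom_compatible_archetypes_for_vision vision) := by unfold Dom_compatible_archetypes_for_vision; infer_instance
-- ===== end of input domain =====

-- B replaces A's per-call scan of the stance table by a literal inverted map
-- vision -> archetype set consulted with one dict lookup (objective: idiomatic).

-- ===== PORT A =====
-- the module constant V2A_STANCED, as its items list (insertion order)
def pvV2A : List ((String × String) × String) :=
  [(("Open Horizons, Unstable Ground", "Opening"), "Pioneer"),
   (("Open Horizons, Unstable Ground", "Mobilizing"), "Pioneer"),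
   (("Open Horizons, Unstable Ground", "Normalizing"), "Pioneer"),
   (("Open Horizons, Unstable Ground", "Controlling"), "Guardian"),
   (("Empowered but Exposed", "Opening"), "Pioneer"),
   (("Empowered but Exposed", "Mobilizing"), "Builder"),
   (("Empowered but Exposed", "Normalizing"), "Guardian"),
   (("Empowered but Exposed", "Controlling"), "Guardian"),
   (("Seamless but Concentrated", "Opening"), "Pioneer"),
   (("Seamless but Concentrated", "Mobilizing"), "Builder"),
   (("Seamless but Concentrated", "Normalizing"), "Pioneer"),
   (("Seamless but Concentrated", "Controlling"), "Guardian"),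
   (("Transformed or Left Behind", "Opening"), "Pioneer"),
   (("Transformed or Left Behind", "Mobilizing"), "Builder"),
   (("Transformed or Left Behind", "Normalizing"), "Pioneer"),
   (("Transformed or Left Behind", "Controlling"), "Guardian"),
   (("Guided but Fragile", "Opening"), "Pioneer"),
   (("Guided but Fragile", "Mobilizing"), "Guardian"),
   (("Guided but Fragile", "Normalizing"), "Guardian"),
   (("Guided but Fragile", "Controlling"), "Guardian")]

def compatible_archetypes_for_vision (vision : String) : Option (List String) :=
  if vision == "All" then none
  else
    let out : PySem.Set String :=
      pvV2A.foldl (fun out p => if p.1.1 == vision then PySem.Set.add out p.2 else out)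
        PySem.Set.empty
    if out = [] then none else some out

-- ===== PORT B =====
-- the module constant VISION2ARCHS: a literal inverted map (each frozenset as its
-- distinct-element list)
def pvVision2Archs : PySem.Dict String (List String) :=
  PySem.Dict.ofList
  [("Open Horizons, Unstable Ground", ["Pioneer", "Guardian"]),
   ("Empowered but Exposed", ["Pioneer", "Builder", "Guardian"]),
   ("Seamless but Concentrated", ["Pioneer", "Builder", "Guardian"]),
   ("Transformed or Left Behind", ["Pioneer", "Builder", "Guardian"]),
   ("Guided but Fragile", ["Pioneer", "Guardian"])]

def compatible_archetypes_for_vision_alt (vision : String) : Option (List String) :=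
  if vision == "All" then none
  else
    match PySem.Dict.get? pvVision2Archs vision with  -- VISION2ARCHS.get(vision)
    | some hits => if hits = [] then none else some hits  -- set(hits) if hits else None
    | none => none

-- ===== PRECONDITION & SPEC =====
def Spec_compatible_archetypes_for_vision (vision : String) (out : Option (List String)) : Prop := out = compatible_archetypes_for_vision_alt vision
instance (vision : String) (out : Option (List String)) : Decidable (Spec_compatible_archetypes_for_vision vision out) := by unfold Spec_compatible_archetypes_for_vision; infer_instance

-- ===== CLAIM =====
def Claim_equal_compatible_archetypes_for_vision : Prop := ∀ (vision : String), Dom_compatible_archetypes_for_vision vision → Spec_compatible_archetypes_for_vision vision (compatible_archetypes_for_vision vision)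

-- ===== LEMMAS AND PROOFS =====

-- ===== VERDICT =====
theorem compatible_archetypes_for_vision_spec : Claim_equal_compatible_archetypes_for_vision := by
  intro vision _
  unfold Spec_compatible_archetypes_for_vision
  by_cases h1 : vision = "Open Horizons, Unstable Ground"; · subst h1; decide
  by_cases h2 : vision = "Empowered but Exposed"; · subst h2; decide
  by_cases h3 : vision = "Seamless but Concentrated"; · subst h3; decide
  by_cases h4 : vision = "Transformed or Left Behind"; · subst h4; decide
  by_cases h5 : vision = "Guided but Fragile"; · subst h5; decide
  have e1 : ("Open Horizons, Unstable Ground" == vision) = false := by simp [Ne.symm h1]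
  have e2 : ("Empowered but Exposed" == vision) = false := by simp [Ne.symm h2]
  have e3 : ("Seamless but Concentrated" == vision) = false := by simp [Ne.symm h3]
  have e4 : ("Transformed or Left Behind" == vision) = false := by simp [Ne.symm h4]
  have e5 : ("Guided but Fragile" == vision) = false := by simp [Ne.symm h5]
  simp [compatible_archetypes_for_vision, compatible_archetypes_for_vision_alt, pvV2A,
    pvVision2Archs, PySem.Dict.get?, PySem.Dict.ofList, PySem.Dict.update,
    PySem.Dict.empty, PySem.Dict.insert, PySem.Dict.contains, Option.map, List.find?,
    List.foldl, beq_iff_eq, e1, e2, e3, e4, e5, Ne.symm h1, Ne.symm h2, Ne.symm h3,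
    Ne.symm h4, Ne.symm h5]
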